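/- GENERATED by farm/worked/mk_tree_copies.py from farm/worked/setup_temp_free/Proof.lean (a worked proof of the farm's unit `setup_temp_free`,
   accepted by the verdict) — do not edit. -/
import Asan.CheckWalk
import Vorbis.Spec.Units.setup_temp_free

/-!
  Unit `setup_temp_free`: lemmas.

  FINDING (CONTRACT-PRE). The machine-level contract `setup_temp_free.weakSpec` lets `p` (rsi) be ANY 8-aligned address of the data
  space. The function poisons the granules of `[p, p + r8 sz)` (0x10b12d, `arena_poison`) BEFORE the checked load of
  `f->temp_offset` (0x10b139, `__asan_load4_noabort(f + 132)`). If the poisoned granules contain the granule of `f + 132 … f + 135`,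
  that check fails and the run goes into `__asan_report`: `not_accSmall_poisonMem_w`. (Freeze-6 added the missing fact to the contract's pre.)
  With the missing fact (the poisoned bytes do not meet `[f + 132, f + 136)`) the check passes: `accSmall_poisonMem_w`, and the
  whole function satisfies the contract: `calls_of_apart_w`.
-/

namespace Vorbis.Spec.Worked.setup_temp_free
open Vorbis.Spec.setup_temp_free (Statement)
open X86 X86.User Asan Vorbis Vorbis.Spec

set_option maxRecDepth 4000
set_option maxHeartbeats 4000000

/-- The footprint of `arena_poison` as a literal list (Vorbis/Spec/Runtime.lean has the frame size in `vspec`, not the windows). -/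
theorem arenaPoison_writes_w (u : State) :
    arenaPoisonSpec.writes u = [shadowSpan (u.reg .rdi).toNat ((u.reg .rdi).toNat + (u.reg .rsi).toNat)] := id rfl

/-- `movsxd rsi, ebx` after `add ebx, 7 ; and ebx, ~7` (0x10b121 – 0x10b127, C line 1000): the second argument of `arena_poison`
is `r8 sz`, for a size that is not "negative" after rounding. -/
theorem size_toNat_w (x : BitVec 32) (h : x.toNat ≤ 0x7FFFFFF8) :
    (Word.ofBV (BitVec.signExtend 64 ((x + 7#32) &&& 4294967288#32))).toNat = r8 x.toNat := by
  have h1 := r8_bv x h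
  have h2 := r8_lt x.toNat
  rw [toNat_sext32 _ (by omega)]
  exact h1

/-- **A small check of bytes that `arena_poison(p, N)` does not touch passes afterwards as it did before** (the check at 0x10b139,
`f + 132`, with the fact the contract lacks: nothing is poisoned (`N = 0`), or the `k` bytes
at `a` lie below `p`, or above the last poisoned granule). -/
theorem accSmall_poisonMem_w {mem : Mem} {p N k : Nat} {a : Word} (hk : 1 ≤ k) (h : AccSmall k mem a) (hp8 : p % 8 = 0)
    (hplo : 0x100000 ≤ p) (hphi : p + (N + 7) / 8 * 8 ≤ 0xC00000)
    (hout : N = 0 ∨ a.toNat + k ≤ p ∨ p + (N + 7) / 8 * 8 ≤ a.toNat) : AccSmall k (poisonMem mem p N) a := by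
  obtain ⟨hs, hc, htop, hfull, hlast⟩ := h
  refine ⟨sealed_poisonMem hs p N hp8 hplo hphi, hc, htop, ?_, ?_⟩
  · intro g hg1 hg2
    rw [shadowOf_poisonMem_out mem p N g hp8 hphi (by omega) (by omega)]
    exact hfull g hg1 hg2
  · unfold ByteOK shadowByte at hlast ⊢
    rw [shadowOf_poisonMem_out mem p N _ hp8 hphi (by omega) (by omega)]
    exact hlast

/-- **THE COUNTER-STATE, the shadow half**: after `arena_poison(p, N)` a 4-byte check whose last byte lies in a poisoned granule
FAILS (the shadow byte is FAH: negative as a signed char), whatever the memory was before. -/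
theorem not_accSmall_poisonMem_w (mem : Mem) (p N : Nat) (a : Word) (hp8 : p % 8 = 0)
    (hphi : p + (N + 7) / 8 * 8 ≤ 0xC00000) (h1 : p ≤ a.toNat + 3) (h2 : a.toNat + 3 < p + N) :
    ¬ AccSmall 4 (poisonMem mem p N) a := by
  intro h
  obtain ⟨_, _, _, _, hlast⟩ := h
  unfold ByteOK ByteOKv shadowByte at hlast
  rw [shadowOf_poisonMem_in mem p N _ hp8 hphi (by omega) (by omega)] at hlast
  omega

/-- `add [rbp + 0x84], ebx` (0x10b141, C line 1001) with `ebx = ((sz + 7) & ~7) + 32`: the value stored into `temp_offset`. -/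
theorem stored_toNat_w (t : Nat) (x : BitVec 32) (h : x.toNat ≤ 0x7FFFFFF8) :
    (BitVec.ofNat 32 t + (((x + 7#32) &&& 4294967288#32) + 32#32)).toNat = (t + r8 x.toNat + 32) % 2 ^ 32 := by
  have h1 := r8_bv x h
  simp only [BitVec.toNat_add, BitVec.toNat_ofNat, h1]
  omega

/-- **WITH THE MISSING FACT THE FUNCTION SATISFIES ITS CONTRACT** (the proposed fix works): `hapart` = the poisoned bytes
`[p, p + r8 sz)` do not meet `[f + 132, f + 136)` (`temp_offset`), or there are none (`sz = 0`: the one call of start_decoder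
that uses the machine-level contract directly). Everything else is the unit's statement, word for word.
One walk to `arena_poison` (0x10b12d; the `free` arm is pruned by `alloc_buffer ≠ 0`, the `p = 0` arm returns at once), the
contract of `arena_poison`, a second walk to the `ret`. -/
theorem calls_of_apart_w (Lay : Layout) (hLay : Lay.hi = 0x1000000) (μ : Microarch) (hμ : UserX.MicroOK μ) (u₀ : State)
    (hcode : HasCodeNat Lay u₀ Vorbis.L.setup_temp_free.entry Vorbis.Code.code_setup_temp_free.nat Vorbis.L.setup_temp_free.size)
    (hload8 : Asan.SmallCheck Lay μ Vorbis.WayInv (Vorbis.CodeOK u₀) [.rax, .rcx, .rdx] 8 Vorbis.L.__asan_load8_noabort.entry)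
    (hpoison : Calls Lay μ Vorbis.WayInv (Vorbis.conv u₀) Vorbis.L.arena_poison.entry Asan.arenaPoisonSpec)
    (hload4 : Asan.SmallCheck Lay μ Vorbis.WayInv (Vorbis.CodeOK u₀) [.rax, .rcx, .rdx] 4 Vorbis.L.__asan_load4_noabort.entry)
    (others : List Obj) (frames : List (Nat × FrameLayout)) (u : State) (ret : Word)
    (he : AtEntry (Vorbis.conv u₀) Vorbis.L.setup_temp_free.entry (Vorbis.Spec.setup_temp_free.weakSpec others frames).frame ret u)
    (hpre : (Vorbis.Spec.setup_temp_free.weakSpec others frames).pre u)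
    (hapart : u.reg .rsi = 0 ∨ r8 ((u.reg .rdx).toNat % 2 ^ 32) = 0 ∨
      (u.reg .rsi).toNat + r8 ((u.reg .rdx).toNat % 2 ^ 32) ≤ (u.reg .rdi).toNat + 132 ∨
      (u.reg .rdi).toNat + 136 ≤ (u.reg .rsi).toNat) :
    ReachVia Lay μ Vorbis.WayInv u (Returned (Vorbis.conv u₀) (Vorbis.Spec.setup_temp_free.weakSpec others frames) u ret) := by
  v_entry he
  obtain ⟨hsh, hobj, hbuf, hcase, _⟩ := hpre
  have hsp := hsh.rsp
  have hwhere := hobj.where_ hsh.inv hsh.offText (by omega)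
  have r112 : u.mem.readLE (u.reg .rdi + 112) 8 = stb_vorbis.alloc.alloc_buffer u.mem (u.reg .rdi).toNat := by
    simp only [vfield, vacc, voff]
    exact readLE_field u.mem (u.reg .rdi) 112 8
  have hbuflt : stb_vorbis.alloc.alloc_buffer u.mem (u.reg .rdi).toNat < 2 ^ 64 := by
    rw [← r112]
    exact Mem.readLE_lt' u.mem _ 8
  generalize stb_vorbis.alloc.alloc_buffer u.mem (u.reg .rdi).toNat = buf at *
  u_walk hcode [hμ.vendor] span [Vorbis.L.textLo, Vorbis.L.textHi] side (v_side)
  case check_10b110 =>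
    -- 0x10b110, C line 999: the check of `f->alloc.alloc_buffer` (`f + 112`, 8 bytes): inside `*f`, the shadow is the entry's
    have hun : ShadowUntouched u.mem s_10b110.mem := by v_untouched
    exact hobj.accSmall hsh.inv hun _ 8 (by decide) (by u_omega) (by u_omega)
  case call_inv =>
    -- 0x10b12d, C line 1000: DF and the MXCSR masks at the entry of `arena_poison`
    v_inv
  case pre_10b12d =>
    -- the precondition of `arena_poison(p, r8 sz)`: from the contract's `p % 8 = 0`, `100000H ≤ p`, `p + r8 sz ≤ C00000H`
    have hp := hcase.resolve_left (by
      intro h0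
      apply hbr_10b11f
      rw [h0]
      rfl)
    obtain ⟨hp8, hplo, hphi⟩ := hp
    have hn : (Word.part .w32 (u.reg .rdx)).toNat ≤ 0x7FFFFFF8 := by
      rw [part32_toNat]
      have := le_r8 ((u.reg .rdx).toNat % 2 ^ 32)
      omega
    show (s_10b12d.reg .rdi).toNat % 8 = 0 ∧ 0x100000 ≤ (s_10b12d.reg .rdi).toNat ∧
      (s_10b12d.reg .rdi).toNat + ((s_10b12d.reg .rsi).toNat + 7) / 8 * 8 ≤ 0xC00000
    rw [w_rdi, w_rsi, size_toNat_w _ hn, part32_toNat]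
    have hr := r8_mod ((u.reg .rdx).toNat % 2 ^ 32)
    refine ⟨hp8, hplo, ?_⟩
    omega
  case cont =>
    -- 0x10b11f taken, C line 999 (ARENA-FIX 2): `p = 0`, `pop rbx ; pop rbp ; pop r12 ; ret` at 0x10b147: no effect
    refine ReachVia.done ?_
    v_returned
    have hp0 : u.reg .rsi = 0 := by
      apply UInt64.toNat_inj.mp
      exact hbr_10b11f
    refine ⟨fun _ => ⟨by v_untouched, ?_⟩, fun hne => absurd hp0 hne⟩
    have h132 : u.mem.readLE (u.reg .rdi + 132) 4 = u.mem.readLE (u.reg .rdi + 132) 4 := rfl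
    u_frame h132
  case cont =>
    -- THE CUT POINT of CONTRACTS 88, "after arena_poison": 0x10b132, C line 1001, `p ≠ 0`
    have hp := hcase.resolve_left (by
      intro h0
      apply hbr_10b11f
      rw [h0]
      rfl)
    obtain ⟨hp8, hplo, hphi⟩ := hp
    have hn : (Word.part .w32 (u.reg .rdx)).toNat ≤ 0x7FFFFFF8 := by
      rw [part32_toNat]
      have := le_r8 ((u.reg .rdx).toNat % 2 ^ 32)
      omega
    have hN : (s_10b12d.reg .rsi).toNat = r8 ((u.reg .rdx).toNat % 2 ^ 32) := by
      rw [w_rsi_10b12d, size_toNat_w _ hn, part32_toNat]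
    obtain ⟨hmem, hkeep⟩ := w_post
    rw [w_rdi_10b12d, hN] at hmem
    v_after_call w_rsp_10b12d w_mem_10b12d
    simp only [arenaPoison_writes_w, w_rdi_10b12d, hN] at w_same
    obtain ⟨N, hNdef⟩ : ∃ N, r8 ((u.reg .rdx).toNat % 2 ^ 32) = N := ⟨_, rfl⟩
    have hap := hapart.resolve_left (by
      intro h0
      apply hbr_10b11f
      rw [h0]
      rfl)
    clear hapart
    rw [hNdef] at w_same hmem hphi hN hap
    simp only [shadowSpan] at w_same
    have hmem' := hmem.symm
    clear hmem
    have hN8 : N % 8 = 0 := by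
      rw [← hNdef]
      exact r8_mod _
    -- the return address and the three pushed registers, carried over the callee's footprint
    have hs0 : UInt64.ofNat (s_10b12dr.mem.readLE (u.reg .rsp) 8) = ret := by
      u_frame he_retAddr
    have hp1 : UInt64.ofNat (s_10b12d.mem.readLE (u.reg .rsp - 8) 8) = u.reg .r12 := by u_resolve
    have hp2 : UInt64.ofNat (s_10b12d.mem.readLE (u.reg .rsp - 16) 8) = u.reg .rbp := by u_resolve
    have hp3 : UInt64.ofNat (s_10b12d.mem.readLE (u.reg .rsp - 24) 8) = u.reg .rbx := by u_resolve
    have hs1 : UInt64.ofNat (s_10b12dr.mem.readLE (u.reg .rsp - 8) 8) = u.reg .r12 := by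
      rw [w_mem_10b12d] at hp1
      u_frame hp1
    have hs2 : UInt64.ofNat (s_10b12dr.mem.readLE (u.reg .rsp - 16) 8) = u.reg .rbp := by
      rw [w_mem_10b12d] at hp2
      u_frame hp2
    have hs3 : UInt64.ofNat (s_10b12dr.mem.readLE (u.reg .rsp - 24) 8) = u.reg .rbx := by
      rw [w_mem_10b12d] at hp3
      u_frame hp3
    -- the load of `f->temp_offset` after the call, as a fact for the walk: the shadow stores are above `*f`
    have h132 : u.mem.readLE (u.reg .rdi + 132) 4 = u.mem.readLE (u.reg .rdi + 132) 4 := rfl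
    have r132 : s_10b12dr.mem.readLE (u.reg .rdi + 132) 4 = u.mem.readLE (u.reg .rdi + 132) 4 := by u_frame h132
    obtain ⟨t, ht⟩ : ∃ t, u.mem.readLE (u.reg .rdi + 132) 4 = t := ⟨_, rfl⟩
    rw [ht] at r132
    u_walk hcode [hμ.vendor] span [Vorbis.L.textLo, Vorbis.L.textHi] side (v_side)
    case check_10b139 =>
      -- the check of `f->temp_offset` AFTER the poisoning: this is where the contract's pre is too weak (`hapart`)
      have hun : ShadowUntouched u.mem s_10b12d.mem := by
        rw [w_mem_10b12d]
        v_untouched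
      have hacc : AccSmall 4 s_10b12d.mem (u.reg .rdi + 132) :=
        hobj.accSmall hsh.inv hun _ 4 (by decide) (by u_omega) (by u_omega)
      have e132 : (u.reg .rdi + 132).toNat = (u.reg .rdi).toNat + 132 :=
        X86.User.toNat_add_ofNat (u.reg .rdi) 132 (by omega)
      have hacc2 : AccSmall 4 s_10b12dr.mem (u.reg .rdi + 132) := by
        rw [← hmem']
        refine accSmall_poisonMem_w (by decide) hacc hp8 hplo (by omega) ?_
        rw [e132]
        omega
      have hun2 : ShadowUntouched s_10b12dr.mem s_10b139.mem := by v_untouched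
      exact ⟨hacc2.1.eqOn hun2, hacc2.2.eqOn (by decide) hun2⟩
    case cont =>
      -- 0x10b14b: the state after the `ret`
      refine ReachVia.done ?_
      v_returned
      · -- the post, `p ≠ 0`
        have hne : u.reg .rsi ≠ 0 := by
          intro h0
          apply hbr_10b11f
          rw [h0]
          rfl
        refine ⟨fun h0 => absurd h0 hne, fun _ => ⟨⟨s_10b12d.mem, ?_, ?_⟩, ?_⟩⟩
        · -- the four stack stores before `arena_poison` did not touch the shadow
          rw [w_mem_10b12d]
          v_untouched
        · -- nor did the two stores after it
          rw [hNdef, hmem']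
          v_untouched
        · -- `temp_offset += r8 sz + 32`
          rw [w_mem, Mem.readLE_writeLE_same _ _ _ _ (by decide), stored_toNat_w _ _ hn, part32_toNat, ht, hNdef]
          omega
      · -- the footprint: the frame, `temp_offset`, the shadow of the released block
        simp only [X86.User.Spec.footprint, vspec, shadowSpan, hNdef]
        u_same

end Vorbis.Spec.Worked.setup_temp_free

/-- The unit (the machine-level contract `setup_temp_free.weakSpec`): `calls_of_apart_w` with the last clause of the precondition. -/
theorem Vorbis.Spec.Worked.setup_temp_free_ok : Vorbis.Spec.setup_temp_free.Statement := by
  intro Lay hLay μ hμ u₀ hcode hload8 hpoison hload4 _hfree others frames u ret he hpre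
  exact Vorbis.Spec.Worked.setup_temp_free.calls_of_apart_w Lay hLay μ hμ u₀ hcode hload8 hpoison hload4 others frames u ret he hpre
    hpre.2.2.2.2
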